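-- pv_equiv track=rewrite | github.com/Vardandatasciences/RISKAVAIRE_TPRM | grc_backend/grc/routes/Risk/risk_dashboard_filter.py | generate_chart_colors
-- ===== SOURCE A (Python) =====
-- def generate_chart_colors(count):
--     """Helper function to generate chart colors"""
--     colors = [
--         '#4ade80', '#f87171', '#fbbf24', '#60a5fa', '#818cf8',
--         '#f472b6', '#a78bfa', '#34d399', '#fbbf24', '#fb7185',
--         '#8b5cf6', '#06b6d4', '#10b981', '#f59e0b', '#ef4444'
--     ]
--
--     result = []
--     for i in range(count):
--         result.append(colors[i % len(colors)])
--
--     return result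
-- ===== SOURCE B (Python) =====
-- def generate_chart_colors(count):
--     """Helper function to generate chart colors"""
--     colors = [
--         '#4ade80', '#f87171', '#fbbf24', '#60a5fa', '#818cf8',
--         '#f472b6', '#a78bfa', '#34d399', '#fbbf24', '#fb7185',
--         '#8b5cf6', '#06b6d4', '#10b981', '#f59e0b', '#ef4444'
--     ]
--     reps = count // len(colors) + 1
--     return (colors * reps)[:count]
-- ===== Notes on version B (the rewrite author's own statement) =====
-- stated objective: idiomatic
-- what changed: Replaces the element-by-element index loop with modulo lookup by a closed-form repeat-and-truncate: build colors * (count//15 + 1) once and slice it to count (list multiplication and slicing run in C, avoiding the per-element Python loop).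
import Mathlib
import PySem

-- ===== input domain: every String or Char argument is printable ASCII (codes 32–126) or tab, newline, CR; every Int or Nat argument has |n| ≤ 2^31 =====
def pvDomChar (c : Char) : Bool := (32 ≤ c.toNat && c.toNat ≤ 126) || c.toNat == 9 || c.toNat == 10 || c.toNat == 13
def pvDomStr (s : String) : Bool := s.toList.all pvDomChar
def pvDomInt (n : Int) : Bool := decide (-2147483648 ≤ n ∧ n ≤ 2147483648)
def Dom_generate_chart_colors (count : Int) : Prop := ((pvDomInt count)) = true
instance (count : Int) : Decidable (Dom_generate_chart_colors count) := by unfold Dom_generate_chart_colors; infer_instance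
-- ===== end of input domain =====

-- B replaces A's index loop with modulo lookup by a closed-form repeat-and-truncate of the palette (idiomatic rewrite, same cost).

-- the palette literal shared by both sources
def pvColors : List String :=
  ["#4ade80", "#f87171", "#fbbf24", "#60a5fa", "#818cf8",
   "#f472b6", "#a78bfa", "#34d399", "#fbbf24", "#fb7185",
   "#8b5cf6", "#06b6d4", "#10b981", "#f59e0b", "#ef4444"]

-- ===== PORT A =====
-- for i in range(count): result.append(colors[i % len(colors)])   (the index i % 15 is always in range, so pyGetD is exact)
def generate_chart_colors (count : Int) : List String :=
  (PySem.List.pyRange 0 count 1).foldl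
    (fun result i => result ++ [PySem.List.pyGetD pvColors (PySem.Int.mod i (pvColors.length : Int)) ""]) []

-- ===== PORT B =====
-- reps = count // len(colors) + 1; return (colors * reps)[:count]   (list*n with n ≤ 0 is [], hence .toNat)
def generate_chart_colors_alt (count : Int) : List String :=
  let reps : Int := PySem.Int.floordiv count (pvColors.length : Int) + 1
  PySem.List.slice ((List.replicate reps.toNat pvColors).flatten) none (some count)

-- ===== PRECONDITION & SPEC =====
def Spec_generate_chart_colors (count : Int) (out : List String) : Prop := out = generate_chart_colors_alt count
instance (count : Int) (out : List String) : Decidable (Spec_generate_chart_colors count out) := by unfold Spec_generate_chart_colors; infer_instance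

-- ===== CLAIM (what is proved, stated in full; the proofs are below) =====
def Claim_equal_generate_chart_colors : Prop := ∀ (count : Int), Dom_generate_chart_colors count → Spec_generate_chart_colors count (generate_chart_colors count)

-- ===== LEMMAS AND PROOFS =====

theorem pv_len_flat (l : List String) (k : Nat) :
    ((List.replicate k l).flatten).length = k * l.length := by
  simp [List.length_flatten, List.map_replicate, List.sum_replicate, smul_eq_mul]

theorem pv_getD_flat (l : List String) (d : String) (k i : Nat)
    (h : i < k * l.length) :
    ((List.replicate k l).flatten).getD i d = l.getD (i % l.length) d := by
  induction k generalizing i with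
  | zero => omega
  | succ k ih =>
    rw [List.replicate_succ, List.flatten_cons]
    by_cases hi : i < l.length
    · rw [List.getD_eq_getElem _ _ (by simp; omega), List.getElem_append_left hi]
      rw [Nat.mod_eq_of_lt hi, List.getD_eq_getElem _ _ hi]
    · have hge : l.length ≤ i := by omega
      have hkl : (k + 1) * l.length = k * l.length + l.length := by ring
      rw [List.getD_append_right _ _ _ _ hge, ih (i - l.length) (by omega),
        Nat.mod_eq_sub_mod hge]

theorem pv_cyc (n : Nat) :
    (List.range n).map (fun i => pvColors.getD (i % 15) "") =
      ((List.replicate (n / 15 + 1) pvColors).flatten).take n := by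
  have h15 : pvColors.length = 15 := by decide
  have hlen : ((List.replicate (n / 15 + 1) pvColors).flatten).length = (n / 15 + 1) * 15 := by
    rw [pv_len_flat, h15]
  have hn : n < (n / 15 + 1) * 15 := by
    have := Nat.div_add_mod n 15
    have := Nat.mod_lt n (show 0 < 15 by omega)
    omega
  apply List.ext_getElem
  · simp [hlen]; omega
  · intro i hi hi'
    simp only [List.length_map, List.length_range] at hi
    have hif : i < ((List.replicate (n / 15 + 1) pvColors).flatten).length := by
      rw [hlen]; omega
    rw [List.getElem_map, List.getElem_range, List.getElem_take,
      ← List.getD_eq_getElem _ "" hif, pv_getD_flat pvColors "" _ _ (by rw [h15]; omega), h15]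

-- ===== VERDICT (by name: the statement is the Claim_ definition above) =====
theorem generate_chart_colors_spec : Claim_equal_generate_chart_colors := by
  intro count _
  simp only [Spec_generate_chart_colors, generate_chart_colors, generate_chart_colors_alt]
  rw [PySem.List.foldl_append_singleton_eq_map, PySem.List.pyRange_one]
  by_cases hpos : 0 ≤ count
  · -- count ≥ 0
    obtain ⟨n, rfl⟩ : ∃ n : Nat, count = (n : Int) := ⟨count.toNat, (Int.toNat_of_nonneg hpos).symm⟩
    have h15 : pvColors.length = 15 := by decide
    simp only [h15, Int.sub_zero, Int.toNat_natCast, List.map_map]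
    rw [show ((15 : Nat) : Int) = ((15 : Int)) by norm_num] at *
    have hfd : PySem.Int.floordiv (n : Int) (15 : Int) + 1 = ((n / 15 + 1 : Nat) : Int) := by
      rw [show ((15:Int)) = ((15:Nat):Int) by norm_num, PySem.Int.floordiv_natCast]; push_cast; ring
    rw [hfd, PySem.List.slice_to _ (by positivity), Int.toNat_natCast, Int.toNat_natCast]
    rw [← pv_cyc n]
    apply List.map_congr_left
    intro i hi
    simp only [Function.comp, Int.zero_add]
    rw [show ((15:Int)) = ((15:Nat):Int) by norm_num, PySem.Int.mod_natCast,
      PySem.List.pyGetD_natCast]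
  · -- count < 0 : both sides are []
    have hneg : count < 0 := by omega
    have h1 : (count - 0).toNat = 0 := by omega
    have h2 : (PySem.Int.floordiv count (pvColors.length : Int) + 1).toNat = 0 := by
      have h15 : pvColors.length = 15 := by decide
      rw [h15, show ((15:Nat):Int) = (15:Int) by norm_num]
      have hb : PySem.Int.floordiv count 15 < 0 := by
        have := PySem.Int.floordiv_mul_add_mod count 15
        have := PySem.Int.mod_nonneg count (show (0:Int) < 15 by omega)
        have := PySem.Int.mod_lt count (show (0:Int) < 15 by omega)
        nlinarith [PySem.Int.floordiv_mul_add_mod count 15]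
      omega
    rw [h1, h2]
    simp [PySem.List.slice]
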